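-- pv_equiv track=rewrite | github.com/hrandib/mcu_fancontrol | utility/fanutil.py | calc_crc_byte
-- ===== SOURCE A (Python) =====
-- def calc_crc_byte(crc, byte):
--     for i in range(8, 0, -1):
--         mix = (crc ^ byte) & 0x01
--         crc >>= 1
--         if mix > 0:
--             crc ^= 0x8C
--         byte >>= 1
--     return crc
-- ===== SOURCE B (Python) =====
-- # Table-driven Dallas/Maxim CRC-8: precompute the 256-entry table once, then one
-- # lookup per call; '^ (crc >> 8)' carries the high bits the bit-loop preserves.
-- _CRC8_TABLE = []
-- for _i in range(256):
--     _c = _i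
--     for _ in range(8):
--         _c = (_c >> 1) ^ 0x8C if _c & 1 else _c >> 1
--     _CRC8_TABLE.append(_c)
--
--
-- def calc_crc_byte(crc, byte):
--     return _CRC8_TABLE[(crc ^ byte) & 0xFF] ^ (crc >> 8)
-- ===== Notes on version B (the rewrite author's own statement) =====
-- stated objective: idiomatic
-- what changed: Replaces the 8-iteration bit-feedback loop by a one-time 256-entry Dallas/Maxim CRC-8 table and a single lookup 'table[(crc ^ byte) & 0xFF] ^ (crc >> 8)' per call.
import Mathlib
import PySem

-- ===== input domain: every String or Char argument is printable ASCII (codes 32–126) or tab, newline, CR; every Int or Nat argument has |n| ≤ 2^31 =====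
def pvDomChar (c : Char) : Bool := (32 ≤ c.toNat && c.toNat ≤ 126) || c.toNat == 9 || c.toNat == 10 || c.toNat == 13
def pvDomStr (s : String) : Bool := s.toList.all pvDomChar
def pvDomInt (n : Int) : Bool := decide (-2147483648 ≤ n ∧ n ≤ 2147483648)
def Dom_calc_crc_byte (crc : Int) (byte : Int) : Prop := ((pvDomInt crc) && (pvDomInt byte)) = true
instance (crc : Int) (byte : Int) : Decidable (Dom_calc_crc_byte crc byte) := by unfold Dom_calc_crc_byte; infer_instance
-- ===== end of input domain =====

-- B replaces A's 8-iteration bit-feedback loop by a precomputed 256-entry CRC-8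
-- table and a single lookup per call (objective: idiomatic table-driven CRC).

-- ===== PORT A =====
def calc_crc_byte (crc : Int) (byte : Int) : Int :=
  ((PySem.List.pyRange 8 0 (-1)).foldl
    (fun (s : Int × Int) _ =>
      let mix := PySem.Int.band (PySem.Int.bxor s.1 s.2) 1
      let c := s.1 >>> (1 : Nat)
      let c := if mix > 0 then PySem.Int.bxor c 0x8C else c
      (c, s.2 >>> (1 : Nat))) (crc, byte)).1

-- ===== PORT B =====
def crc8Update (c : Int) : Int :=
  if PySem.Int.band c 1 ≠ 0 then PySem.Int.bxor (c >>> (1 : Nat)) 0x8C else c >>> (1 : Nat)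

def crcTable : List Int :=
  (PySem.List.pyRange 0 256 1).foldl
    (fun acc i => acc ++ [(PySem.List.pyRange 0 8 1).foldl (fun c _ => crc8Update c) i]) []

-- the index is always in 0..255 (proved below), so the .getD 0 default is never taken
def calc_crc_byte_alt (crc : Int) (byte : Int) : Int :=
  PySem.Int.bxor
    ((PySem.List.pyGet? crcTable (PySem.Int.band (PySem.Int.bxor crc byte) 255)).getD 0)
    (crc >>> (8 : Nat))

-- ===== PRECONDITION & SPEC =====
def Spec_calc_crc_byte (crc : Int) (byte : Int) (out : Int) : Prop := out = calc_crc_byte_alt crc byte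
instance (crc : Int) (byte : Int) (out : Int) : Decidable (Spec_calc_crc_byte crc byte out) := by unfold Spec_calc_crc_byte; infer_instance

-- ===== CLAIM (what is proved, stated in full; the proofs are below) =====
def Claim_equal_calc_crc_byte : Prop := ∀ (crc : Int) (byte : Int), Dom_calc_crc_byte crc byte → Spec_calc_crc_byte crc byte (calc_crc_byte crc byte)

-- ===== LEMMAS AND PROOFS =====

-- proof-side reformulation of A's loop
def pvStep (c b : Int) : Int :=
  let mix := PySem.Int.band (PySem.Int.bxor c b) 1
  let c' := c >>> (1 : Nat)
  if mix > 0 then PySem.Int.bxor c' 0x8C else c'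

def pvLoop : Nat → Int → Int → Int
  | 0, c, _ => c
  | k+1, c, b => pvLoop k (pvStep c b) (b >>> (1 : Nat))

theorem pv_L0 (crc byte : Int) : calc_crc_byte crc byte = pvLoop 8 crc byte := by
  have h : PySem.List.pyRange 8 0 (-1) = [8, 7, 6, 5, 4, 3, 2, 1] := by decide
  simp only [calc_crc_byte, h, List.foldl, pvLoop, pvStep]

-- two's-complement extensionality
theorem pv_tb_mixed (m n : Nat) (h : ∀ i, Nat.testBit m i = !Nat.testBit n i) : False := by
  have hm : m.testBit (max m n) = false :=
    Nat.testBit_lt_two_pow (lt_of_le_of_lt (le_max_left m n) Nat.lt_two_pow_self)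
  have hn : n.testBit (max m n) = false :=
    Nat.testBit_lt_two_pow (lt_of_le_of_lt (le_max_right m n) Nat.lt_two_pow_self)
  have := h (max m n)
  rw [hm, hn] at this
  simp at this

theorem pv_tb_ext {a b : Int} (h : ∀ i, a.testBit i = b.testBit i) : a = b := by
  cases a with
  | ofNat m =>
    cases b with
    | ofNat n =>
      exact congrArg Int.ofNat (Nat.eq_of_testBit_eq (fun i => by simpa [Int.testBit] using h i))
    | negSucc n =>
      exact absurd (fun i => by simpa [Int.testBit] using h i) (fun hh => pv_tb_mixed m n hh)
  | negSucc m =>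
    cases b with
    | ofNat n =>
      exact absurd (fun i => by simpa [Int.testBit] using (h i).symm) (fun hh => pv_tb_mixed n m hh)
    | negSucc n =>
      refine congrArg Int.negSucc (Nat.eq_of_testBit_eq (fun i => ?_))
      have := h i
      simpa [Int.testBit] using this

theorem pv_tb_sr (x : Int) (k i : Nat) : (x >>> k).testBit i = x.testBit (i + k) := by
  cases x with
  | ofNat m =>
    show (Int.ofNat (m >>> k)).testBit i = (Int.ofNat m).testBit (i + k)
    simp [Int.testBit, Nat.testBit_shiftRight, Nat.add_comm]
  | negSucc m =>
    show (Int.negSucc (m >>> k)).testBit i = (Int.negSucc m).testBit (i + k)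
    simp [Int.testBit, Nat.testBit_shiftRight, Nat.add_comm]

theorem pv_sl_zero (x : Int) : x <<< (0 : Nat) = x := by
  cases x with
  | ofNat m => rfl
  | negSucc m => rfl

theorem pv_sr_zero (x : Int) : x >>> (0 : Nat) = x := by
  cases x with
  | ofNat m => rfl
  | negSucc m => rfl

theorem pv_sr_sr (x : Int) (k : Nat) : (x >>> (1 : Nat)) >>> k = x >>> (k + 1) := by
  cases x with
  | ofNat m =>
    show Int.ofNat ((m >>> 1) >>> k) = Int.ofNat (m >>> (k + 1))
    rw [← Nat.shiftRight_add, Nat.add_comm]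
  | negSucc m =>
    show Int.negSucc ((m >>> 1) >>> k) = Int.negSucc (m >>> (k + 1))
    rw [← Nat.shiftRight_add, Nat.add_comm]

theorem pv_sl_succ (x : Int) (k : Nat) : x <<< (k + 1) = (x <<< k) <<< (1 : Nat) := by
  cases x with
  | ofNat m =>
    show Int.ofNat (m <<< (k + 1)) = Int.ofNat ((m <<< k) <<< 1)
    rw [Nat.shiftLeft_add]
  | negSucc m =>
    show Int.negSucc ((m + 1) <<< (k + 1) - 1)
        = Int.negSucc (((m + 1) <<< k - 1 + 1) <<< 1 - 1)
    have h1 : 0 < (m + 1) <<< k := by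
      rw [Nat.shiftLeft_eq]
      positivity
    rw [Nat.sub_add_cancel h1, Nat.shiftLeft_add]

theorem pv_bit_true (n : Nat) : 2 * n + 1 = Nat.bit true n := by
  simp [Nat.bit]

theorem pv_sl1_negSucc (n : Nat) : (Int.negSucc n) <<< (1 : Nat) = Int.negSucc (2 * n + 1) := by
  show Int.negSucc ((n + 1) <<< 1 - 1) = Int.negSucc (2 * n + 1)
  congr 1

theorem pv_tb_sl1_zero (x : Int) : (x <<< (1 : Nat)).testBit 0 = false := by
  cases x with
  | ofNat n =>
    show (Int.ofNat (n <<< 1)).testBit 0 = false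
    simp [Int.testBit]
  | negSucc n =>
    rw [pv_sl1_negSucc]
    simp only [Int.testBit]
    simp [Nat.testBit_zero]

theorem pv_tb_sl1_succ (x : Int) (i : Nat) : (x <<< (1 : Nat)).testBit (i + 1) = x.testBit i := by
  cases x with
  | ofNat n =>
    show (Int.ofNat (n <<< 1)).testBit (i + 1) = (Int.ofNat n).testBit i
    simp [Int.testBit, Nat.testBit_shiftLeft]
  | negSucc n =>
    rw [pv_sl1_negSucc]
    simp only [Int.testBit]
    rw [pv_bit_true, Nat.testBit_bit_succ]

theorem pv_tb_sl (x : Int) (k i : Nat) :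
    (x <<< k).testBit i = (decide (k ≤ i) && x.testBit (i - k)) := by
  induction k generalizing i with
  | zero => rw [pv_sl_zero]; simp
  | succ k ih =>
    rw [pv_sl_succ]
    cases i with
    | zero => simp [pv_tb_sl1_zero]
    | succ i =>
      rw [pv_tb_sl1_succ, ih]
      simp [Nat.succ_sub_succ]

theorem pv_negSucc_nonneg (n : Nat) : ¬ (0 : Int) ≤ Int.negSucc n := by omega

theorem pv_negSucc_inv (n : Nat) : -Int.negSucc n - 1 = (n : Int) := by
  rw [Int.negSucc_eq]
  ring

theorem pv_xor_eq (a b : Int) : PySem.Int.bxor a b = a.xor b := by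
  cases a with
  | ofNat m =>
    cases b with
    | ofNat n =>
      unfold PySem.Int.bxor
      rw [if_pos (show (0:Int) ≤ Int.ofNat m from Int.natCast_nonneg m), if_pos (show (0:Int) ≤ Int.ofNat n from Int.natCast_nonneg n)]
      show ((Int.toNat (Int.ofNat m)) ^^^ (Int.toNat (Int.ofNat n)) : Nat) = Int.xor (Int.ofNat m) (Int.ofNat n)
      rfl
    | negSucc n =>
      unfold PySem.Int.bxor
      rw [if_pos (show (0:Int) ≤ Int.ofNat m from Int.natCast_nonneg m), if_neg (pv_negSucc_nonneg n), pv_negSucc_inv]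
      show -(((Int.toNat (Int.ofNat m)) ^^^ (Int.toNat (n : Int)) : Nat) : Int) - 1
          = Int.xor (Int.ofNat m) (Int.negSucc n)
      show -(((m ^^^ n : Nat)) : Int) - 1 = Int.negSucc (m ^^^ n)
      rw [Int.negSucc_eq]
      ring
  | negSucc m =>
    cases b with
    | ofNat n =>
      unfold PySem.Int.bxor
      rw [if_neg (pv_negSucc_nonneg m), if_pos (show (0:Int) ≤ Int.ofNat n from Int.natCast_nonneg n), pv_negSucc_inv]
      show -(((Int.toNat (m : Int)) ^^^ (Int.toNat (Int.ofNat n)) : Nat) : Int) - 1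
          = Int.xor (Int.negSucc m) (Int.ofNat n)
      show -(((m ^^^ n : Nat)) : Int) - 1 = Int.negSucc (m ^^^ n)
      rw [Int.negSucc_eq]
      ring
    | negSucc n =>
      unfold PySem.Int.bxor
      rw [if_neg (pv_negSucc_nonneg m), if_neg (pv_negSucc_nonneg n), pv_negSucc_inv, pv_negSucc_inv]
      show (((Int.toNat (m : Int)) ^^^ (Int.toNat (n : Int)) : Nat) : Int)
          = Int.xor (Int.negSucc m) (Int.negSucc n)
      show (((m ^^^ n : Nat)) : Int) = ((m ^^^ n : Nat) : Int)
      rfl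

theorem pv_band1 (x : Int) : PySem.Int.band x 1 = if x.testBit 0 then 1 else 0 := by
  cases x with
  | ofNat m =>
    unfold PySem.Int.band
    rw [if_pos (show (0:Int) ≤ Int.ofNat m from Int.natCast_nonneg m), if_pos (by norm_num)]
    show ((m &&& (Int.toNat 1) : Nat) : Int) = if (Int.ofNat m).testBit 0 then 1 else 0
    show ((m &&& 1 : Nat) : Int) = if m.testBit 0 then 1 else 0
    rw [Nat.and_one_is_mod, Nat.testBit_zero]
    rcases Nat.mod_two_eq_zero_or_one m with h | h <;> simp [h]
  | negSucc m =>
    unfold PySem.Int.band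
    rw [if_neg (pv_negSucc_nonneg m), if_pos (by norm_num), pv_negSucc_inv]
    show (((Int.toNat 1) - ((Int.toNat 1) &&& (Int.toNat (m : Int))) : Nat) : Int)
        = if (Int.negSucc m).testBit 0 then 1 else 0
    show ((1 - (1 &&& m) : Nat) : Int) = if !m.testBit 0 then 1 else 0
    rw [Nat.one_and_eq_mod_two, Nat.testBit_zero]
    rcases Nat.mod_two_eq_zero_or_one m with h | h <;> simp [h]

theorem pv_255_testBit (i : Nat) : Nat.testBit 255 i = decide (i < 8) := by
  have : (255 : Nat) = 2 ^ 8 - 1 := by norm_num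
  rw [this, Nat.testBit_two_pow_sub_one]

set_option maxRecDepth 4096 in
theorem pv_tb_band255 (x : Int) (i : Nat) :
    (PySem.Int.band x 255).testBit i = (decide (i < 8) && x.testBit i) := by
  cases x with
  | ofNat m =>
    unfold PySem.Int.band
    rw [if_pos (show (0:Int) ≤ Int.ofNat m from Int.natCast_nonneg m), if_pos (by norm_num)]
    show (Int.ofNat (m &&& (Int.toNat 255))).testBit i = (decide (i < 8) && (Int.ofNat m).testBit i)
    show ((m &&& 255 : Nat)).testBit i = (decide (i < 8) && m.testBit i)
    rw [Nat.testBit_and, pv_255_testBit, Bool.and_comm]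
  | negSucc m =>
    unfold PySem.Int.band
    rw [if_neg (pv_negSucc_nonneg m), if_pos (by norm_num), pv_negSucc_inv]
    show (Int.ofNat ((Int.toNat 255) - ((Int.toNat 255) &&& (Int.toNat (m : Int))))).testBit i
        = (decide (i < 8) && (Int.negSucc m).testBit i)
    show ((255 - (255 &&& m) : Nat)).testBit i = (decide (i < 8) && !m.testBit i)
    have hs : (255 &&& m) < 256 := Nat.lt_succ_of_le Nat.and_le_left
    have h255 : ∀ s : Nat, s < 256 → 255 - s = 255 ^^^ s := by decide
    rw [h255 _ hs, Nat.testBit_xor, Nat.testBit_and, pv_255_testBit]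
    by_cases hi : i < 8 <;> by_cases hmt : m.testBit i = true <;> simp [hi, hmt]

theorem pv_band255_range (x : Int) : 0 ≤ PySem.Int.band x 255 ∧ PySem.Int.band x 255 < 256 := by
  cases x with
  | ofNat m =>
    unfold PySem.Int.band
    rw [if_pos (show (0:Int) ≤ Int.ofNat m from Int.natCast_nonneg m), if_pos (by norm_num)]
    show (0 : Int) ≤ ((m &&& 255 : Nat) : Int) ∧ ((m &&& 255 : Nat) : Int) < 256
    have : (m &&& 255) ≤ 255 := Nat.and_le_right
    constructor
    · exact_mod_cast Nat.zero_le _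
    · exact_mod_cast Nat.lt_succ_of_le this
  | negSucc m =>
    unfold PySem.Int.band
    rw [if_neg (pv_negSucc_nonneg m), if_pos (by norm_num), pv_negSucc_inv]
    show (0 : Int) ≤ ((255 - (255 &&& m) : Nat) : Int) ∧ ((255 - (255 &&& m) : Nat) : Int) < 256
    have : (255 - (255 &&& m)) ≤ 255 := Nat.sub_le _ _
    constructor
    · exact_mod_cast Nat.zero_le _
    · exact_mod_cast Nat.lt_succ_of_le this

theorem pv_xorshift (x y : Int) (k : Nat) : (x.xor y) >>> k = (x >>> k).xor (y >>> k) := by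
  apply pv_tb_ext; intro i; simp [Int.testBit_lxor, pv_tb_sr]

theorem pv_sl_sr (h : Int) (k : Nat) : (h <<< (k + 1)) >>> (1 : Nat) = h <<< k := by
  apply pv_tb_ext; intro i
  simp [pv_tb_sr, pv_tb_sl]

theorem pv_tb_zero (i : Nat) : (0 : Int).testBit i = false := by
  show (Int.ofNat 0).testBit i = false
  simp [Int.testBit]

theorem pv_xor_zero (x : Int) : x.xor 0 = x := by
  apply pv_tb_ext; intro i; simp [Int.testBit_lxor, pv_tb_zero]

theorem pv_zero_sr : (0 : Int) >>> (1 : Nat) = 0 := rfl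

theorem pv_step_xor (c b h g : Int) (k : Nat) :
    pvStep ((c.xor (h <<< (k + 1)))) ((b.xor (g <<< (k + 1)))) = (pvStep c b).xor (h <<< k) := by
  have hbit : (PySem.Int.bxor (c.xor (h <<< (k + 1))) (b.xor (g <<< (k + 1)))).testBit 0
      = (PySem.Int.bxor c b).testBit 0 := by
    rw [pv_xor_eq, pv_xor_eq]
    simp [Int.testBit_lxor, pv_tb_sl]
  have hsh : (c.xor (h <<< (k + 1))) >>> (1 : Nat) = (c >>> (1 : Nat)).xor (h <<< k) := by
    rw [pv_xorshift, pv_sl_sr]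
  simp only [pvStep, pv_band1, hbit]
  by_cases h0 : (PySem.Int.bxor c b).testBit 0 <;> simp only [h0, if_true] <;>
    rw [hsh]
  · show PySem.Int.bxor ((c >>> (1 : Nat)).xor (h <<< k)) 140
        = (PySem.Int.bxor (c >>> (1 : Nat)) 140).xor (h <<< k)
    rw [pv_xor_eq, pv_xor_eq]
    apply pv_tb_ext; intro i
    simp [Int.testBit_lxor, Bool.xor_comm, Bool.xor_left_comm]
  · norm_num

theorem pv_step_absorb (c b : Int) :
    (pvStep c b).xor (b >>> (1 : Nat)) = pvStep (c.xor b) 0 := by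
  have hbit : (PySem.Int.bxor (c.xor b) 0).testBit 0 = (PySem.Int.bxor c b).testBit 0 := by
    rw [pv_xor_eq, pv_xor_eq]
    simp [Int.testBit_lxor, pv_tb_zero]
  simp only [pvStep, pv_band1, hbit]
  by_cases h0 : (PySem.Int.bxor c b).testBit 0 <;> simp only [h0, if_true]
  · show (PySem.Int.bxor (c >>> (1 : Nat)) 140).xor (b >>> (1 : Nat))
        = PySem.Int.bxor ((c.xor b) >>> (1 : Nat)) 140
    rw [pv_xor_eq, pv_xor_eq, pv_xorshift]
    apply pv_tb_ext; intro i
    simp [Int.testBit_lxor, Bool.xor_comm]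
  · norm_num
    exact (pv_xorshift c b 1).symm

theorem pv_shift_out : ∀ (k : Nat) (c b h g : Int),
    pvLoop k (c.xor (h <<< k)) (b.xor (g <<< k)) = (pvLoop k c b).xor h
  | 0, c, b, h, g => by rw [pv_sl_zero, pv_sl_zero]; rfl
  | k + 1, c, b, h, g => by
    show pvLoop k (pvStep (c.xor (h <<< (k + 1))) (b.xor (g <<< (k + 1))))
        ((b.xor (g <<< (k + 1))) >>> (1 : Nat)) = (pvLoop (k + 1) c b).xor h
    rw [pv_step_xor,
      show ((b.xor (g <<< (k + 1))) >>> (1 : Nat)) = (b >>> (1 : Nat)).xor (g <<< k) from by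
        rw [pv_xorshift, pv_sl_sr]]
    rw [pv_shift_out k (pvStep c b) (b >>> (1 : Nat)) h g]
    rfl

theorem pv_absorb : ∀ (k : Nat) (c b : Int),
    pvLoop k c b = (pvLoop k (c.xor b) 0).xor (b >>> k)
  | 0, c, b => by
    rw [pv_sr_zero]
    show c = (c.xor b).xor b
    apply pv_tb_ext; intro i
    simp [Int.testBit_lxor]
  | k + 1, c, b => by
    show pvLoop k (pvStep c b) (b >>> (1 : Nat))
        = (pvLoop k (pvStep (c.xor b) 0) ((0 : Int) >>> (1 : Nat))).xor (b >>> (k + 1))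
    rw [pv_zero_sr, pv_absorb k (pvStep c b) (b >>> (1 : Nat)), pv_step_absorb, pv_sr_sr]

theorem pv_split (x : Int) :
    (PySem.Int.band x 255).xor ((x >>> (8 : Nat)) <<< (8 : Nat)) = x := by
  apply pv_tb_ext; intro i
  rw [Int.testBit_lxor, pv_tb_band255, pv_tb_sl]
  rcases Nat.lt_or_ge i 8 with hi | hi
  · simp [hi, show ¬ 8 ≤ i from by omega]
  · simp [show ¬ i < 8 from by omega, hi, pv_tb_sr, Nat.sub_add_cancel hi]

theorem pv_index (crc byte : Int) :
    PySem.Int.band (PySem.Int.bxor crc byte) 255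
      = (PySem.Int.band crc 255).xor (PySem.Int.band byte 255) := by
  apply pv_tb_ext; intro i
  simp [pv_tb_band255, pv_xor_eq, Int.testBit_lxor, Bool.and_xor_distrib_left]

theorem pv_small_sr (x : Int) (h0 : 0 ≤ x) (h1 : x < 256) : x >>> (8 : Nat) = 0 := by
  obtain ⟨n, rfl⟩ := Int.eq_ofNat_of_zero_le h0
  show Int.ofNat (n >>> 8) = 0
  have hn : n < 256 := by exact_mod_cast h1
  have : n >>> 8 = 0 := by
    rw [Nat.shiftRight_eq_div_pow]
    exact Nat.div_eq_of_lt (by omega)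
  rw [this]
  rfl

theorem pv_update (c : Int) : crc8Update c = pvStep c 0 := by
  simp only [crc8Update, pvStep, PySem.Int.bxor_zero, pv_band1]
  by_cases h0 : c.testBit 0 <;> simp [h0]

theorem pv_table_get (j : Int) (h0 : 0 ≤ j) (h1 : j < 256) :
    (PySem.List.pyGet? crcTable j).getD 0 = pvLoop 8 j 0 := by
  have hinner : ∀ x : Int,
      (PySem.List.pyRange 0 8 1).foldl (fun c _ => crc8Update c) x = pvLoop 8 x 0 := by
    intro x
    rw [show PySem.List.pyRange 0 8 1 = [0, 1, 2, 3, 4, 5, 6, 7] from by decide]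
    simp only [List.foldl, pv_update, pvLoop, pv_zero_sr]
  have htab : crcTable = (PySem.List.pyRange 0 ((256 : Nat) : Int) 1).map
      (fun i => (PySem.List.pyRange 0 8 1).foldl (fun c _ => crc8Update c) i) := by
    rw [crcTable, PySem.List.foldl_append_singleton_eq_map]
    norm_num
  have hn : j.toNat < 256 := by omega
  rw [htab, PySem.List.pyGet?_of_nonneg _ h0,
    PySem.List.getElem?_map_pyRange_zero _ 256 j.toNat hn]
  show (PySem.List.pyRange 0 8 1).foldl (fun c _ => crc8Update c) ((j.toNat : Nat) : Int) = _
  rw [hinner, Int.toNat_of_nonneg h0]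

theorem pv_main (crc byte : Int) : calc_crc_byte crc byte = calc_crc_byte_alt crc byte := by
  obtain ⟨hg0, hg1⟩ := pv_band255_range (PySem.Int.bxor crc byte)
  have e1 : pvLoop 8 crc byte
      = (pvLoop 8 (PySem.Int.band crc 255) (PySem.Int.band byte 255)).xor (crc >>> (8 : Nat)) := by
    conv_lhs => rw [← pv_split crc, ← pv_split byte]
    exact pv_shift_out 8 _ _ _ _
  have e2 : pvLoop 8 (PySem.Int.band crc 255) (PySem.Int.band byte 255)
      = pvLoop 8 (PySem.Int.band (PySem.Int.bxor crc byte) 255) 0 := by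
    rw [pv_absorb 8 (PySem.Int.band crc 255) (PySem.Int.band byte 255), ← pv_index,
      pv_small_sr _ (pv_band255_range byte).1 (pv_band255_range byte).2, pv_xor_zero]
  rw [pv_L0, e1, e2, calc_crc_byte_alt, pv_table_get _ hg0 hg1, pv_xor_eq]
  exact (pv_xor_eq _ _).symm

-- ===== VERDICT (by name: the statement is the Claim_ definition above) =====
theorem calc_crc_byte_spec : Claim_equal_calc_crc_byte := by
  intro crc byte _
  unfold Spec_calc_crc_byte
  exact pv_main crc byte
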